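-- pv_equiv track=rewrite | github.com/Alienmiep/pattern-matching-nester | helper.py | get_edge_case
-- ===== SOURCE A (Python) =====
-- def get_edge_case(edge_a_part: str, edge_b_part: str, relative_position: str) -> int:
--     if relative_position == "parallel":
--         return 8
--     elif edge_a_part == "end" and edge_b_part == "end":
--         return 7
--
--     case_table = {
--         1: ["start", "start", "left"],
--         2: ["start", "start", "right"],
--         3: ["start", "end", "left"],
--         4: ["start", "end", "right"],
--         5: ["end", "start", "left"],
--         6: ["end", "start", "right"],
--     }
--     for key, value in case_table.items():
--         if value == [edge_a_part, edge_b_part, relative_position]: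
--             return key
--     return 0
-- ===== SOURCE B (Python) =====
-- def get_edge_case(edge_a_part: str, edge_b_part: str, relative_position: str) -> int:
--     if relative_position == "parallel":
--         return 8
--     if edge_a_part == "end" and edge_b_part == "end":
--         return 7
--     if edge_a_part in ("start", "end") and edge_b_part in ("start", "end") \
--             and relative_position in ("left", "right"):
--         return 2 * (2 * (edge_a_part == "end") + (edge_b_part == "end")) \
--             + (relative_position == "right") + 1
--     return 0
-- ===== Notes on version B (the rewrite author's own statement) =====
-- stated objective: simpler
-- what changed: Replaced the six-entry dict table scan with membership validation plus a closed-form arithmetic formula mapping the valid combinations to 1..6.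
import Mathlib
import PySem

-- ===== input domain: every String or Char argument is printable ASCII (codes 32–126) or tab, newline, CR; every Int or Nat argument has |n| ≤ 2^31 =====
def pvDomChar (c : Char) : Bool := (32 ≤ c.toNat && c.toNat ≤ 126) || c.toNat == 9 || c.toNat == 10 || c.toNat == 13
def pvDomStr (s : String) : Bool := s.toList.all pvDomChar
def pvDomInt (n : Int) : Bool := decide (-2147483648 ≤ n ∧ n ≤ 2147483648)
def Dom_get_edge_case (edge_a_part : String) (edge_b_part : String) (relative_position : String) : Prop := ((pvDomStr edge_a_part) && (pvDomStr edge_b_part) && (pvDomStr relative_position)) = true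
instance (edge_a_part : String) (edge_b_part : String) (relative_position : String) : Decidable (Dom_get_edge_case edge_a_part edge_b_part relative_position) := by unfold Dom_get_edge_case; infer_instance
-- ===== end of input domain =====

-- B replaces A's dict-table scan with a closed-form arithmetic formula after validating membership (objective: simpler).

-- ===== PORT A =====
-- the for-loop over the dict's items, returning the first matching key, else 0
def get_edge_case_loop (triple : List String) : List (Int × List String) → Int
  | [] => 0
  | (k, v) :: rest => if v = triple then k else get_edge_case_loop triple rest

def get_edge_case (edge_a_part : String) (edge_b_part : String) (relative_position : String) : Int :=
  if relative_position = "parallel" then 8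
  else if edge_a_part = "end" ∧ edge_b_part = "end" then 7
  else
    let case_table : List (Int × List String) :=
      [(1, ["start", "start", "left"]),
       (2, ["start", "start", "right"]),
       (3, ["start", "end", "left"]),
       (4, ["start", "end", "right"]),
       (5, ["end", "start", "left"]),
       (6, ["end", "start", "right"])]
    get_edge_case_loop [edge_a_part, edge_b_part, relative_position] case_table

-- ===== PORT B =====
def get_edge_case_alt (edge_a_part : String) (edge_b_part : String) (relative_position : String) : Int :=
  if relative_position = "parallel" then 8
  else if edge_a_part = "end" ∧ edge_b_part = "end" then 7
  else if (edge_a_part = "start" ∨ edge_a_part = "end") ∧ (edge_b_part = "start" ∨ edge_b_part = "end")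
          ∧ (relative_position = "left" ∨ relative_position = "right") then
    2 * (2 * (if edge_a_part = "end" then (1 : Int) else 0) + (if edge_b_part = "end" then 1 else 0))
      + (if relative_position = "right" then 1 else 0) + 1
  else 0

-- ===== PRECONDITION & SPEC =====
def Spec_get_edge_case (edge_a_part : String) (edge_b_part : String) (relative_position : String) (out : Int) : Prop := out = get_edge_case_alt edge_a_part edge_b_part relative_position
instance (edge_a_part : String) (edge_b_part : String) (relative_position : String) (out : Int) : Decidable (Spec_get_edge_case edge_a_part edge_b_part relative_position out) := by unfold Spec_get_edge_case; infer_instance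

-- ===== CLAIM (what is proved, stated in full; the proofs are below) =====
def Claim_equal_get_edge_case : Prop := ∀ (edge_a_part : String) (edge_b_part : String) (relative_position : String), Dom_get_edge_case edge_a_part edge_b_part relative_position → Spec_get_edge_case edge_a_part edge_b_part relative_position (get_edge_case edge_a_part edge_b_part relative_position)

-- ===== LEMMAS AND PROOFS =====
theorem loop_eq (a b r : String) (h7 : ¬ (a = "end" ∧ b = "end")) :
    get_edge_case_loop [a, b, r]
      [(1, ["start", "start", "left"]),
       (2, ["start", "start", "right"]),
       (3, ["start", "end", "left"]),
       (4, ["start", "end", "right"]),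
       (5, ["end", "start", "left"]),
       (6, ["end", "start", "right"])]
    = if (a = "start" ∨ a = "end") ∧ (b = "start" ∨ b = "end") ∧ (r = "left" ∨ r = "right") then
        2 * (2 * (if a = "end" then (1 : Int) else 0) + (if b = "end" then 1 else 0))
          + (if r = "right" then 1 else 0) + 1
      else 0 := by
  by_cases ha1 : a = "start" <;> by_cases ha2 : a = "end" <;>
  by_cases hb1 : b = "start" <;> by_cases hb2 : b = "end" <;>
  by_cases hr1 : r = "left" <;> by_cases hr2 : r = "right" <;>
    simp_all [get_edge_case_loop, eq_comm]

-- ===== VERDICT (by name: the statement is the Claim_ definition above) =====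
theorem get_edge_case_spec : Claim_equal_get_edge_case := by
  intro a b r _
  unfold Spec_get_edge_case get_edge_case get_edge_case_alt
  by_cases hr : r = "parallel"
  · simp [hr]
  · by_cases h7 : a = "end" ∧ b = "end"
    · simp [hr, h7]
    · simp only [if_neg hr, if_neg h7]
      exact loop_eq a b r h7
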